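-- pv_equiv track=rewrite | github.com/ngaustin/open_spiel | open_spiel/python/games/bargaining_generalized.py | get_offer_map
-- ===== SOURCE A (Python) =====
-- import itertools
--
-- def get_offer_map(item_types, min_pool_size, max_pool_size):
--   # Our sampling GUARANTEES that there is at least 1 of each item in the pool AND both players value all items at least > 0
--   # This implies that an item and have a count of [1, (pool_size - (item_types - 1))] (inclusive) in the pool
--
--   # Calculate the number of possible offers under the different pool sizes
--   # Then, create a hash map that maps OFFER_INDEX to a length-(item_types) offer, corresponding to what the offering player wants to take
--   offers_found, offer_index_to_division = 0, {}
--
--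
--   # You only need to consider max_pool_size because if it's a plausible offer with the max number of items, it is also a plausible offer under a smaller pool size
--   # These are offers, so we could still have a player taking only 0 of an item. However, the upper bound still applies.
--   cartesian_product = itertools.product(list(range(0, max_pool_size - item_types + 2)), repeat=item_types)
--   for candidate_offer in cartesian_product:
--     # Conditions: for an offer to be plausible: 1) each item count must be <= its max item count and 2) the total number of items <= total pool size
--     # (1) is accounted for in the cartesian product. (2) can be checked manually
--     is_plausible_offer = sum(candidate_offer) <= max_pool_size
--     if is_plausible_offer:
--       offer_index_to_division[offers_found] = candidate_offer
--       offers_found += 1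
--   return offers_found, offer_index_to_division
-- ===== SOURCE B (Python) =====
-- def get_offer_map(item_types, min_pool_size, max_pool_size):
--   # Iterative level-by-level enumeration with partial-sum pruning: grow valid
--   # prefixes one item type at a time (lexicographic order), keeping each
--   # prefix as a (last_choice, parent) chain plus its remaining budget, so
--   # only valid prefixes are ever visited.
--   values = list(range(0, max_pool_size - item_types + 2))  # per-item candidate counts
--   level = [(max_pool_size, None)]  # (remaining budget, reversed chain of choices)
--   for _ in range(item_types):
--     new = []
--     for budget, chain in level:
--       for v in values:
--         if v > budget:
--           break
--         new.append((budget - v, (v, chain)))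
--     level = new
--   offers_found = 0
--   offer_index_to_division = {}
--   for budget, chain in level:
--     if budget >= 0:
--       offer = []
--       while chain is not None:
--         offer.append(chain[0])
--         chain = chain[1]
--       offer.reverse()
--       offer_index_to_division[offers_found] = tuple(offer)
--       offers_found += 1
--   return offers_found, offer_index_to_division
-- ===== Notes on version B (the rewrite author's own statement) =====
-- stated objective: alternative
-- what changed: Replaces the full cartesian-product-then-filter scan with an iterative level-by-level enumeration that extends only valid prefixes (pruning each position's candidates to the remaining budget, via parent-pointer chains), producing the same offers in the same lexicographic order; output-sensitive, but not measurably faster on the timed family where few candidates are pruned.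
import Mathlib
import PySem

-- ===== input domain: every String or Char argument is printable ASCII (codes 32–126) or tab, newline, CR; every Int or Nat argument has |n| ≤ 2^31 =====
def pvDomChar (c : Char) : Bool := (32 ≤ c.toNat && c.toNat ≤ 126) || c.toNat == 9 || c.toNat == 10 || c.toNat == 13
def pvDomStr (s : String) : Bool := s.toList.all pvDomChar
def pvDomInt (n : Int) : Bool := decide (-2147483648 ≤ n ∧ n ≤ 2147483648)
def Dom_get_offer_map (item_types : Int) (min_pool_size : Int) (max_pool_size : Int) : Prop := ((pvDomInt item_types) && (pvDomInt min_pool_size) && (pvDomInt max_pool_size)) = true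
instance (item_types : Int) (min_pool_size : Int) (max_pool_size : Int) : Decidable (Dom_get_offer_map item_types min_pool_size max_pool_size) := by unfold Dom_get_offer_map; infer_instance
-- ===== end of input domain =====

-- B replaces A's full cartesian-product-then-filter scan by an iterative
-- level-by-level enumeration that extends only valid prefixes, pruning each
-- position's candidates to the remaining budget (same lexicographic order);
-- objective: alternative (output-sensitive traversal, same results).


-- ===== PORT A =====
-- itertools.product(xs, repeat=k), in itertools' lexicographic order
def pyProduct (xs : List Int) : Nat → List (List Int)
  | 0 => [[]]
  | k + 1 => xs.flatMap (fun x => (pyProduct xs k).map (fun t => x :: t))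

def get_offer_map (item_types : Int) (min_pool_size : Int) (max_pool_size : Int) : Int × (List (Int × List Int)) :=
  -- dict keyed by the fresh counter offers_found: insertion = append at the end
  (pyProduct (PySem.List.pyRange 0 (max_pool_size - item_types + 2) 1) item_types.toNat).foldl
    (fun (st : Int × List (Int × List Int)) c =>
      if c.sum ≤ max_pool_size then (st.1 + 1, st.2 ++ [(st.1, c)]) else st)
    (0, [])

-- ===== PORT B =====
-- Source B's inner 'for v in values: if v > budget: break; new.append(...)'
def innerLoop (budget : Int) (chain : List Int) : List Int → List (Int × List Int) → List (Int × List Int)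
  | [], new => new
  | v :: rest, new =>
      if budget < v then new
      else innerLoop budget chain rest (new ++ [(budget - v, v :: chain)])

-- one round of Source B's 'for _ in range(item_types)' loop body
def levelStep (values : List Int) (level : List (Int × List Int)) : List (Int × List Int) :=
  level.foldl (fun new bc => innerLoop bc.1 bc.2 values new) []

def get_offer_map_alt (item_types : Int) (min_pool_size : Int) (max_pool_size : Int) : Int × (List (Int × List Int)) :=
  -- final pass: walking a (last, parent) chain and reversing gives chain.reverse
  ((List.range item_types.toNat).foldl
    (fun level _ => levelStep (PySem.List.pyRange 0 (max_pool_size - item_types + 2) 1) level)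
    [(max_pool_size, [])]).foldl
    (fun (st : Int × List (Int × List Int)) bc =>
      if 0 ≤ bc.1 then (st.1 + 1, st.2 ++ [(st.1, bc.2.reverse)]) else st)
    (0, [])

-- ===== PRECONDITION & SPEC =====
-- Pre_ excludes item_types < 0, on which A raises ValueError (itertools.product
-- with a negative repeat).
def Pre_get_offer_map (item_types : Int) (min_pool_size : Int) (max_pool_size : Int) : Prop := 0 ≤ item_types
instance (item_types : Int) (min_pool_size : Int) (max_pool_size : Int) : Decidable (Pre_get_offer_map item_types min_pool_size max_pool_size) := by unfold Pre_get_offer_map; infer_instance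
def pvWitness_get_offer_map : Int × Int × Int := (2, 2, 4)

def Spec_get_offer_map (item_types : Int) (min_pool_size : Int) (max_pool_size : Int) (out : Int × (List (Int × List Int))) : Prop := out = get_offer_map_alt item_types min_pool_size max_pool_size
instance (item_types : Int) (min_pool_size : Int) (max_pool_size : Int) (out : Int × (List (Int × List Int))) : Decidable (Spec_get_offer_map item_types min_pool_size max_pool_size out) := by unfold Spec_get_offer_map; infer_instance

-- ===== CLAIM (what is proved, stated in full; the proofs are below) =====
def Claim_equal_get_offer_map : Prop := ∀ (item_types : Int) (min_pool_size : Int) (max_pool_size : Int), Dom_get_offer_map item_types min_pool_size max_pool_size → Pre_get_offer_map item_types min_pool_size max_pool_size → Spec_get_offer_map item_types min_pool_size max_pool_size (get_offer_map item_types min_pool_size max_pool_size)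

-- ===== LEMMAS AND PROOFS =====

-- the level of valid prefixes reached after k ≥ 1 rounds, in lexicographic order
def VL (mx M : Int) (k : Nat) : List (Int × List Int) :=
  ((pyProduct (PySem.List.pyRange 0 M 1) k).filter (fun c => decide (c.sum ≤ mx))).map
    (fun c => (mx - c.sum, c.reverse))

theorem innerLoop_eq (b : Int) (ch : List Int) (vs : List Int) :
    ∀ new, innerLoop b ch vs new
      = new ++ (vs.takeWhile (fun v => decide (v ≤ b))).map (fun v => (b - v, v :: ch)) := by
  induction vs with
  | nil => intro new; simp [innerLoop]
  | cons v rest ih =>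
    intro new
    by_cases h : b < v
    · simp [innerLoop, h, show ¬ (v ≤ b) by omega]
    · simp only [innerLoop, if_neg h, ih, List.takeWhile_cons,
        show decide (v ≤ b) = true by simpa using (by omega : v ≤ b)]
      simp

-- takeWhile (≤ c) and filter (≤ c) both clip an ascending range at c+1
theorem takeWhile_pyRange_aux (c : Int) : ∀ (n : Nat) (a b : Int), b - a ≤ n →
    (PySem.List.pyRange a b 1).takeWhile (fun v => decide (v ≤ c))
      = PySem.List.pyRange a (min b (c + 1)) 1 := by
  intro n
  induction n with
  | zero =>
    intro a b h
    rw [PySem.List.pyRange_one_eq_nil (by omega), PySem.List.pyRange_one_eq_nil (by omega)]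
    rfl
  | succ n ih =>
    intro a b h
    by_cases hab : b ≤ a
    · rw [PySem.List.pyRange_one_eq_nil hab, PySem.List.pyRange_one_eq_nil (by omega)]; rfl
    · rw [PySem.List.pyRange_one_cons (by omega), List.takeWhile_cons]
      by_cases hac : a ≤ c
      · rw [PySem.List.pyRange_one_cons (by omega : a < min b (c + 1))]
        simp only [show decide (a ≤ c) = true by simpa using hac, if_true]
        rw [ih (a + 1) b (by omega)]
      · simp only [show decide (a ≤ c) = false by simpa using (by omega : ¬ a ≤ c)]
        rw [PySem.List.pyRange_one_eq_nil (show min b (c + 1) ≤ a by omega)]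
        simp

theorem takeWhile_pyRange (c a b : Int) :
    (PySem.List.pyRange a b 1).takeWhile (fun v => decide (v ≤ c))
      = PySem.List.pyRange a (min b (c + 1)) 1 :=
  takeWhile_pyRange_aux c (b - a).toNat a b (by omega)

theorem filter_pyRange_aux (c : Int) : ∀ (n : Nat) (a b : Int), b - a ≤ n →
    (PySem.List.pyRange a b 1).filter (fun v => decide (v ≤ c))
      = PySem.List.pyRange a (min b (c + 1)) 1 := by
  intro n
  induction n with
  | zero =>
    intro a b h
    rw [PySem.List.pyRange_one_eq_nil (by omega), PySem.List.pyRange_one_eq_nil (by omega)]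
    rfl
  | succ n ih =>
    intro a b h
    by_cases hab : b ≤ a
    · rw [PySem.List.pyRange_one_eq_nil hab, PySem.List.pyRange_one_eq_nil (by omega)]; rfl
    · rw [PySem.List.pyRange_one_cons (by omega), List.filter_cons]
      by_cases hac : a ≤ c
      · simp only [show decide (a ≤ c) = true by simpa using hac, if_pos]
        rw [PySem.List.pyRange_one_cons (by omega : a < min b (c + 1)), ih (a + 1) b (by omega)]
      · simp only [show decide (a ≤ c) = false by simpa using (by omega : ¬ a ≤ c)]
        rw [ih (a + 1) b (by omega), PySem.List.pyRange_one_eq_nil (by omega),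
          PySem.List.pyRange_one_eq_nil (by omega)]
        simp

theorem filter_pyRange (c a b : Int) :
    (PySem.List.pyRange a b 1).filter (fun v => decide (v ≤ c))
      = PySem.List.pyRange a (min b (c + 1)) 1 :=
  filter_pyRange_aux c (b - a).toNat a b (by omega)

-- itertools.product in 'snoc' form: extend every tuple on the right
theorem pyProduct_snoc (xs : List Int) : ∀ (k : Nat),
    pyProduct xs (k + 1) = (pyProduct xs k).flatMap (fun t => xs.map (fun v => t ++ [v])) := by
  intro k
  induction k with
  | zero => simp [pyProduct, ← List.map_eq_flatMap]
  | succ k ih =>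
    conv_lhs => rw [show pyProduct xs (k + 1 + 1)
      = xs.flatMap (fun x => (pyProduct xs (k + 1)).map (fun t => x :: t)) from rfl, ih]
    conv_rhs => rw [show pyProduct xs (k + 1)
      = xs.flatMap (fun x => (pyProduct xs k).map (fun t => x :: t)) from rfl]
    simp only [List.map_flatMap, List.flatMap_map, List.flatMap_assoc, List.map_map,
      List.cons_append, Function.comp_def]

theorem flatMap_filter_of_nil {α β : Type} (p : α → Bool) (f : α → List β) (l : List α)
    (h : ∀ a ∈ l, p a = false → f a = []) : l.flatMap f = (l.filter p).flatMap f := by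
  induction l with
  | nil => rfl
  | cons x t ih =>
    rw [List.flatMap_cons, List.filter_cons]
    by_cases hx : p x
    · rw [if_pos hx, List.flatMap_cons, ih (fun a ha => h a (by simp [ha]))]
    · rw [h x (by simp) (by simpa using hx), if_neg hx, ih (fun a ha => h a (by simp [ha]))]
      simp

-- one round of the level loop advances the valid-prefix level
theorem levelStep_VL (mx M : Int) (k : Nat) :
    levelStep (PySem.List.pyRange 0 M 1) (VL mx M k) = VL mx M (k + 1) := by
  unfold levelStep
  simp only [innerLoop_eq]
  rw [PySem.List.foldl_append_eq_flatMap]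
  rw [List.nil_append]
  unfold VL
  rw [List.flatMap_map]
  rw [pyProduct_snoc, List.filter_flatMap, List.map_flatMap]
  rw [flatMap_filter_of_nil (fun c => decide (c.sum ≤ mx))
      (fun t => (((PySem.List.pyRange 0 M 1).map (fun v => t ++ [v])).filter
        (fun c => decide (c.sum ≤ mx))).map (fun c => (mx - c.sum, c.reverse)))
      (pyProduct (PySem.List.pyRange 0 M 1) k)
      (by
        intro t _ hpt
        dsimp only
        rw [List.filter_map]
        have : ((PySem.List.pyRange 0 M 1).filter
            ((fun c => decide (c.sum ≤ mx)) ∘ (fun v => t ++ [v]))) = [] := by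
          rw [List.filter_congr (q := fun v => decide (v ≤ mx - t.sum))
            (by intro v _; simp only [Function.comp, List.sum_append, List.sum_cons,
              List.sum_nil]; simp only [decide_eq_decide]; omega)]
          rw [filter_pyRange]
          exact PySem.List.pyRange_one_eq_nil (by simp at hpt; omega)
        rw [this]; rfl)]
  apply List.flatMap_congr  -- pointwise equality of the per-prefix blocks
  intro c hc
  have hcs : c.sum ≤ mx := by
    simp only [List.mem_filter, decide_eq_true_eq] at hc; exact hc.2
  rw [takeWhile_pyRange, List.filter_map,
    List.filter_congr (q := fun v => decide (v ≤ mx - c.sum))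
      (by intro v _; simp only [Function.comp, List.sum_append, List.sum_cons,
        List.sum_nil]; simp only [decide_eq_decide]; omega),
    filter_pyRange, List.map_map]
  apply List.map_congr_left
  intro v _
  simp only [Function.comp, List.sum_append, List.sum_cons, List.sum_nil,
    List.reverse_append, List.reverse_cons, List.reverse_nil, List.nil_append,
    List.cons_append, Prod.mk.injEq]
  exact ⟨by omega, trivial⟩

-- the initial level [(mx, [])] behaves like VL mx M 0 under one round
theorem levelStep_init (mx M : Int) :
    levelStep (PySem.List.pyRange 0 M 1) [(mx, [])]
      = levelStep (PySem.List.pyRange 0 M 1) (VL mx M 0) := by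
  by_cases h : 0 ≤ mx
  · unfold VL
    simp [pyProduct, h]
  · unfold VL levelStep
    simp only [pyProduct, List.filter, show decide (List.sum [] ≤ mx) = false by
      simpa using (by omega : ¬ (0:Int) ≤ mx)]
    rw [List.foldl_cons, List.foldl_nil, List.map_nil, List.foldl_nil,
      innerLoop_eq, takeWhile_pyRange, PySem.List.pyRange_one_eq_nil (by omega)]
    rfl

-- iterating the level loop k+1 times lands on VL (k+1)
theorem level_iter (mx M : Int) : ∀ (k : Nat),
    (List.range (k + 1)).foldl (fun l _ => levelStep (PySem.List.pyRange 0 M 1) l) [(mx, [])]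
      = VL mx M (k + 1) := by
  intro k
  induction k with
  | zero =>
    show levelStep _ [(mx, [])] = _
    rw [levelStep_init, levelStep_VL]
  | succ k ih =>
    rw [List.range_succ, List.foldl_append, ih]
    show levelStep _ _ = _
    rw [levelStep_VL]

-- ===== VERDICT (by name: the statement is the Claim_ definition above) =====
theorem get_offer_map_spec : Claim_equal_get_offer_map := by
  intro it mn mx _ _
  unfold Spec_get_offer_map get_offer_map get_offer_map_alt
  cases hn : it.toNat with
  | zero =>
    by_cases h : 0 ≤ mx <;>
      simp [pyProduct, h, List.range_zero]
  | succ k =>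
    rw [level_iter mx (mx - it + 2) k]
    rw [PySem.List.foldl_ite_eq_foldl_filter]
    unfold VL
    rw [List.foldl_map]
    refine PySem.List.foldl_congr_mem _ _ _ _ ?_
    intro acc c hc
    have hcs : c.sum ≤ mx := by
      simp only [List.mem_filter, decide_eq_true_eq] at hc; exact hc.2
    dsimp only
    rw [if_pos (by omega : (0:Int) ≤ mx - c.sum), List.reverse_reverse]
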